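-- pv_equiv track=rewrite | github.com/wzhui815/kubeflow-chart | fix_test.py | wrap_yaml_comments_to_helm
-- ===== SOURCE A (Python) =====
-- def wrap_yaml_comments_to_helm(yaml_content: str) -> str:
--     """
--     修复版：
--     1. 连续 # 注释 + 中间空行 → 合并为一个完整 Helm 注释
--     2. 注释块 最前 / 最后 的空行不包裹
--     3. 注释块 内部空行 保留
--     4. 输出格式 {{/* 内容 */}}
--     """
--     lines = yaml_content.splitlines(keepends=True)
--     result = []
--     comment_block = []  # 收集当前连续注释块（#行 + 内部空行）
--
--     for line in lines:
--         stripped = line.strip()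
--         is_comment_line = stripped.startswith("#")
--         is_blank = stripped == ""
--
--         # ------------------- 核心修复 -------------------
--         # 是注释 或 内部空行 → 继续收集到同一个注释块
--         if is_comment_line or (is_blank and comment_block):
--             comment_block.append(line)
--
--         # 不是注释、也不是注释块内部空行 → 结束注释块
--         else:
--             # 如果有正在收集的注释，先输出
--             if comment_block:
--                 comment_content = "".join(comment_block).rstrip("\n")
--                 helm_comment = f"{{/*\n{comment_content}\n*/}}"
--                 result.append(helm_comment + "\n")
--                 comment_block = []
--
--             # 把当前非注释行加进去（空行 / YAML 内容）
--             result.append(line)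
--
--     # 处理文件末尾残留的注释块
--     if comment_block:
--         comment_content = "".join(comment_block).rstrip("\n")
--         helm_comment = f"{{/*\n{comment_content}\n*/}}"
--         result.append(helm_comment + "\n")
--
--     return "".join(result)
-- ===== SOURCE B (Python) =====
-- def wrap_yaml_comments_to_helm(yaml_content: str) -> str:
--     # Segment scan: an outer index loop; on a comment line an inner scan
--     # consumes the whole comment-or-blank run, which is wrapped at once.
--     lines = yaml_content.splitlines(keepends=True)
--     out = []
--     i = 0
--     n = len(lines)
--     while i < n:
--         line = lines[i]
--         if line.strip().startswith("#"):
--             j = i + 1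
--             while j < n:
--                 t = lines[j].strip()
--                 if t.startswith("#") or t == "":
--                     j += 1
--                 else:
--                     break
--             block = "".join(lines[i:j]).rstrip("\n")
--             out.append("{/*\n" + block + "\n*/}\n")
--             i = j
--         else:
--             out.append(line)
--             i += 1
--     return "".join(out)
-- ===== Notes on version B (the rewrite author's own statement) =====
-- stated objective: alternative
-- what changed: Replaces the streaming pass with a persistent comment_block buffer and flush logic by an outer index loop that, at each comment line, runs an inner scan consuming the whole comment-or-blank run and wraps it in one step; non-comment lines pass through directly.
import Mathlib
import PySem

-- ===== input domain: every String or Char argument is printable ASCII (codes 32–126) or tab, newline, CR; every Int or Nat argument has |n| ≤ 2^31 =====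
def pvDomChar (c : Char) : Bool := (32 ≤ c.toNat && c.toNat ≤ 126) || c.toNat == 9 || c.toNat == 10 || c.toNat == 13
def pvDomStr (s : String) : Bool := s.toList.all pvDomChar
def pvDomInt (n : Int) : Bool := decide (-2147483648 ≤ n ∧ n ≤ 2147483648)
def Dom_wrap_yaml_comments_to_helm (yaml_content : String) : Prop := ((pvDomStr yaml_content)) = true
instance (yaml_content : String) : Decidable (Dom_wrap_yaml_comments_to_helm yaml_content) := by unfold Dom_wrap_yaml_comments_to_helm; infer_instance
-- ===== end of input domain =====

-- B replaces A's streaming buffer-and-flush pass by an outer index loop with an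
-- inner scan that consumes each whole comment-or-blank run at once (objective: alternative).

-- Shared transliterations of the Python built-ins both versions call:
-- str.splitlines(keepends=True), exact on the Dom alphabet (line boundaries there
-- are exactly '\n', '\r', '\r\n'); and s.rstrip("\n").
def pvSplitlinesKeep (acc : List Char) : List Char → List (List Char)
  | [] => if acc = [] then [] else [acc.reverse]
  | '\r' :: '\n' :: rest => (acc.reverse ++ ['\r', '\n']) :: pvSplitlinesKeep [] rest
  | '\r' :: rest => (acc.reverse ++ ['\r']) :: pvSplitlinesKeep [] rest
  | '\n' :: rest => (acc.reverse ++ ['\n']) :: pvSplitlinesKeep [] rest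
  | c :: rest => pvSplitlinesKeep (c :: acc) rest
  termination_by l => l.length

def pvRstripNl (cs : List Char) : List Char :=
  (cs.reverse.dropWhile (· == '\n')).reverse

-- the wrapped Helm comment both Pythons build: "{/*\n" + block.rstrip("\n") + "\n*/}" + "\n"
def pvWrap (blk : List (List Char)) : List Char :=
  "{/*\n".toList ++ pvRstripNl blk.flatten ++ "\n*/}\n".toList

-- ===== PORT A =====
-- A's loop body: state = (result, comment_block)
def pvStepA (st : List (List Char) × List (List Char)) (line : List Char) :
    List (List Char) × List (List Char) :=
  let stripped := PySem.Chars.strip line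
  if PySem.Chars.startswith stripped ['#'] || (stripped == [] && !(st.2 == [])) then
    (st.1, st.2 ++ [line])
  else if !(st.2 == []) then
    (st.1 ++ [pvWrap st.2, line], [])
  else
    (st.1 ++ [line], [])

def wrap_yaml_comments_to_helm (yaml_content : String) : String :=
  let lines := pvSplitlinesKeep [] yaml_content.toList
  let st := lines.foldl pvStepA ([], [])
  let res := if !(st.2 == []) then st.1 ++ [pvWrap st.2] else st.1
  String.ofList res.flatten

-- ===== PORT B =====
-- B's inner scan: consume following lines while comment or blank
def pvConsume : List (List Char) → List (List Char) → List (List Char) × List (List Char)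
  | [], buf => (buf, [])
  | l :: ls, buf =>
    let t := PySem.Chars.strip l
    if PySem.Chars.startswith t ['#'] || t == [] then pvConsume ls (buf ++ [l])
    else (buf, l :: ls)

theorem pvConsume_len : ∀ (ls buf : List (List Char)), (pvConsume ls buf).2.length ≤ ls.length := by
  intro ls
  induction ls with
  | nil => intro buf; simp [pvConsume]
  | cons l ls ih =>
    intro buf
    simp only [pvConsume]
    split
    · exact Nat.le_trans (ih _) (Nat.le_succ _)
    · simp

-- B's outer loop over the line index
def pvGoB : List (List Char) → List (List Char)
  | [] => []
  | l :: ls =>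
    if PySem.Chars.startswith (PySem.Chars.strip l) ['#'] then
      let p := pvConsume ls [l]
      pvWrap p.1 :: pvGoB p.2
    else
      l :: pvGoB ls
  termination_by ls => ls.length
  decreasing_by
  · exact Nat.lt_succ_of_le (pvConsume_len ls [l])
  · exact Nat.lt_succ_self _

def wrap_yaml_comments_to_helm_alt (yaml_content : String) : String :=
  String.ofList (pvGoB (pvSplitlinesKeep [] yaml_content.toList)).flatten

-- ===== PRECONDITION & SPEC =====
def Spec_wrap_yaml_comments_to_helm (yaml_content : String) (out : String) : Prop := out = wrap_yaml_comments_to_helm_alt yaml_content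
instance (yaml_content : String) (out : String) : Decidable (Spec_wrap_yaml_comments_to_helm yaml_content out) := by unfold Spec_wrap_yaml_comments_to_helm; infer_instance

-- ===== CLAIM (what is proved, stated in full; the proofs are below) =====
def Claim_equal_wrap_yaml_comments_to_helm : Prop := ∀ (yaml_content : String), Dom_wrap_yaml_comments_to_helm yaml_content → Spec_wrap_yaml_comments_to_helm yaml_content (wrap_yaml_comments_to_helm yaml_content)

-- ===== LEMMAS AND PROOFS =====

-- A's "finish" step applied to a foldl state
def pvFinishA (st : List (List Char) × List (List Char)) : List (List Char) :=
  if !(st.2 == []) then st.1 ++ [pvWrap st.2] else st.1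

-- the key invariant connecting A's fold with B's two-level scan
theorem pv_key : ∀ (ls res buf : List (List Char)),
    pvFinishA (ls.foldl pvStepA (res, buf)) =
      res ++ (if buf = [] then pvGoB ls
              else pvWrap (pvConsume ls buf).1 :: pvGoB (pvConsume ls buf).2) := by
  intro ls
  induction ls with
  | nil =>
    intro res buf
    by_cases h : buf = [] <;> simp [pvFinishA, pvGoB, pvConsume, h]
  | cons l ls ih =>
    intro res buf
    by_cases hb : buf = []
    · subst hb
      by_cases hc : PySem.Chars.startswith (PySem.Chars.strip l) ['#']
      · -- comment line starts a block
        have hstep : pvStepA (res, []) l = (res, [l]) := by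
          simp [pvStepA, hc]
        rw [List.foldl_cons, hstep, ih]
        have hgo : pvGoB (l :: ls) = pvWrap (pvConsume ls [l]).1 :: pvGoB (pvConsume ls [l]).2 := by
          rw [pvGoB, if_pos hc]
        simp [hgo]
      · -- non-comment line with empty buffer: passthrough
        have hstep : pvStepA (res, []) l = (res ++ [l], []) := by
          simp [pvStepA, hc]
        rw [List.foldl_cons, hstep, ih]
        have hgo : pvGoB (l :: ls) = l :: pvGoB ls := by
          rw [pvGoB, if_neg (by simp [hc])]
        simp [hgo]
    · have hb' : (buf == []) = false := by simpa using hb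
      by_cases hc : PySem.Chars.startswith (PySem.Chars.strip l) ['#'] ∨ PySem.Chars.strip l = []
      · -- collected into the open block
        have hstep : pvStepA (res, buf) l = (res, buf ++ [l]) := by
          rcases hc with h | h <;> simp [pvStepA, h, hb']
        rw [List.foldl_cons, hstep, ih]
        have hcons : pvConsume (l :: ls) buf = pvConsume ls (buf ++ [l]) := by
          rcases hc with h | h <;> simp [pvConsume, h]
        simp [hb, hcons]
      · -- block is flushed, line passes through
        push Not at hc
        obtain ⟨hc1, hc2⟩ := hc
        have hc1' : PySem.Chars.startswith (PySem.Chars.strip l) ['#'] = false := by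
          simpa using hc1
        have hstep : pvStepA (res, buf) l = (res ++ [pvWrap buf, l], []) := by
          simp [pvStepA, hc1', hc2, hb']
        rw [List.foldl_cons, hstep, ih]
        have hcons : pvConsume (l :: ls) buf = (buf, l :: ls) := by
          simp [pvConsume, hc1', hc2]
        have hgo : pvGoB (l :: ls) = l :: pvGoB ls := by
          rw [pvGoB, if_neg (by simp [hc1'])]
        simp [hb, hcons, hgo]

-- ===== VERDICT (by name: the statement is the Claim_ definition above) =====
theorem wrap_yaml_comments_to_helm_spec : Claim_equal_wrap_yaml_comments_to_helm := by
  intro s _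
  show _ = _
  have h : pvFinishA (List.foldl pvStepA ([], []) (pvSplitlinesKeep [] s.toList)) =
      pvGoB (pvSplitlinesKeep [] s.toList) := by
    rw [pv_key]; simp
  unfold wrap_yaml_comments_to_helm wrap_yaml_comments_to_helm_alt
  show String.ofList (pvFinishA (List.foldl pvStepA ([], []) (pvSplitlinesKeep [] s.toList))).flatten = _
  rw [h]
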